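-- pv_equiv track=rewrite | github.com/scoskey/m504 | m504.py | text2ints
-- ===== SOURCE A (Python) =====
-- def text2ints(s,b=1):
--     from math import ceil
--     output = []
--     if b==1:
--         s = s.lower()
--         for i in range(len(s)):
--             n = ord(s[i])-86
--             if 11 <= n and n <= 36:
--                 output.append(n)
--     else:
--         a = text2ints(s)
--         for i in range(ceil(len(a)/b)):
--             j, block = 0, 0
--             while j < b and i*b+j<len(a):
--                 block = 100*block + a[i*b+j]
--                 j = j+1
--             output.append(block)
--     return output
-- ===== SOURCE B (Python) =====
-- def text2ints(s, b=1):
--     digits = [ord(c) - 86 for c in s.lower() if c.isalpha()]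
--     if b == 1:
--         return digits
--     out, block, p, need = [], 0, 1, len(digits) % b or b
--     for n in reversed(digits):
--         block, p, need = block + n * p, 100 * p, need - 1
--         if need == 0:
--             out.append(block)
--             block, p, need = 0, 1, b
--     out.reverse()
--     return out
-- ===== Notes on version B (the rewrite author's own statement) =====
-- stated objective: alternative
-- what changed: B filters letters via c.isalpha() on the lowered string, then builds blocks in ONE reverse pass with positional weights (block += n*p; p *= 100), sizing the trailing block first via len % b, appending blocks back-to-front and reversing at the end — instead of A's recursive self-call, ceil-division block count and left-to-right Horner (100*block+d) while-loop per block.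
import Mathlib
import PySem

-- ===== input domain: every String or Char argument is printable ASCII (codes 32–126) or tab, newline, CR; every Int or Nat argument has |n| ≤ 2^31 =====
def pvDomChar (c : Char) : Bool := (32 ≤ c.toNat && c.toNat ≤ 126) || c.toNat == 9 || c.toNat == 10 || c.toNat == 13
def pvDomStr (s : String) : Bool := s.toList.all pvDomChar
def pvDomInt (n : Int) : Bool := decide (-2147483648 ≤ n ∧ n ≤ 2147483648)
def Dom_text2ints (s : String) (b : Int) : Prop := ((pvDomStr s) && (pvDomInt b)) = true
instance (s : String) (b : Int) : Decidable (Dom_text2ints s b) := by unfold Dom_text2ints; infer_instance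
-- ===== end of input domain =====

-- B filters letters with isalpha on the lowered string and builds the blocks in one reverse
-- pass with positional weights (trailing block first, sized len % b), instead of A's recursive
-- self-call plus per-block left-to-right Horner while-loop (objective: alternative).

-- ===== PORT A =====
-- A's inner 'while j < b and i*b+j < len(a)' loop, verbatim (j, block are the loop state).
-- a[i*b+j] is in range whenever the loop body runs, so pyGetD is exact here.
def pvWhileA (a : List Int) (b i j block : Int) : Int :=
  if j < b ∧ i * b + j < (a.length : Int) then
    pvWhileA a b i (j + 1) (100 * block + PySem.List.pyGetD a (i * b + j) 0)
  else block
termination_by ((a.length : Int) - (i * b + j)).toNat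
decreasing_by omega

-- math.ceil(len(a)/b) is exactly -((-len(a)) // b) for integers (b ≠ 0), ported so.
def text2ints (s : String) (b : Int) : List Int :=
  if b == 1 then
    let s' := (PySem.Str.lower s).toList
    (PySem.List.pyRange 0 (s'.length : Int) 1).foldl (fun output i =>
      let n : Int := ((PySem.List.pyGetD s' i ' ').toNat : Int) - 86
      if 11 ≤ n ∧ n ≤ 36 then output ++ [n] else output) []
  else
    let a := text2ints s 1
    (PySem.List.pyRange 0 (-(PySem.Int.floordiv (-(a.length : Int)) b)) 1).foldl
      (fun output i => output ++ [pvWhileA a b i 0 0]) []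
termination_by (if b = 1 then 0 else 1)
decreasing_by simp_all

-- ===== PORT B =====
-- B's loop body: block, p, need = block + n*p, 100*p, need-1; on need == 0 emit and reset.
def pvStepB (b : Int) (st : List Int × Int × Int × Int) (n : Int) : List Int × Int × Int × Int :=
  let block := st.2.1 + n * st.2.2.1
  let p := 100 * st.2.2.1
  let need := st.2.2.2 - 1
  if need == 0 then (st.1 ++ [block], 0, 1, b) else (st.1, block, p, need)

-- 'len(digits) % b or b' is the if on m == 0; 'reversed(digits)' is digits.reverse.
def text2ints_alt (s : String) (b : Int) : List Int :=
  let digits := (PySem.Str.lower s).toList.filterMap (fun c =>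
    if PySem.Chars.isalpha c then some ((c.toNat : Int) - 86) else none)
  if b == 1 then digits
  else
    let m := PySem.Int.mod (digits.length : Int) b
    ((digits.reverse.foldl (pvStepB b) ([], 0, 1, if m == 0 then b else m)).1).reverse

-- ===== PRECONDITION & SPEC =====
-- Pre_ excludes only b = 0, where A raises ZeroDivisionError (math.ceil(len/0)).
def Pre_text2ints (s : String) (b : Int) : Prop := b ≠ 0
instance (s : String) (b : Int) : Decidable (Pre_text2ints s b) := by unfold Pre_text2ints; infer_instance
def pvWitness_text2ints : String × Int := ("Hello, World!", 3)

def Spec_text2ints (s : String) (b : Int) (out : List Int) : Prop := out = text2ints_alt s b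
instance (s : String) (b : Int) (out : List Int) : Decidable (Spec_text2ints s b out) := by unfold Spec_text2ints; infer_instance

-- ===== CLAIM (what is proved, stated in full; the proofs are below) =====
def Claim_equal_text2ints : Prop := ∀ (s : String) (b : Int), Dom_text2ints s b → Pre_text2ints s b → Spec_text2ints s b (text2ints s b)

-- ===== LEMMAS AND PROOFS =====

-- A's filter condition / produced value
def pvDigit? (c : Char) : Option Int :=
  let n : Int := (c.toNat : Int) - 86
  if 11 ≤ n ∧ n ≤ 36 then some n else none

-- Horner value of one block (A's combine), and B's weighted right-to-left sum
def pvHorner (l : List Int) : Int := l.foldl (fun blk d => 100 * blk + d) 0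

def pvWsum : List Int → Int → Int
  | [], _ => 0
  | n :: t, p => n * p + pvWsum t (100 * p)

-- canonical result of the block phase: chunks of b from the left, Horner-combined
def pvGold (a : List Int) (b : Int) : List Int :=
  if 0 < b then
    (List.range (((a.length : Int) + b - 1) / b).toNat).map
      (fun k => pvHorner ((a.drop (b.toNat * k)).take b.toNat))
  else []

-- A's b == 1 index loop equals filterMap pvDigit?, over any char list
theorem pvBaseFold (cs : List Char) (acc : List Int) :
    cs.foldl (fun output c =>
      let n : Int := ((c.toNat : Int)) - 86
      if 11 ≤ n ∧ n ≤ 36 then output ++ [n] else output) acc = acc ++ cs.filterMap pvDigit? := by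
  induction cs generalizing acc with
  | nil => simp
  | cons c cs ih =>
      by_cases h : 11 ≤ (c.toNat : Int) - 86 ∧ (c.toNat : Int) - 86 ≤ 36
      · have hc : pvDigit? c = some ((c.toNat : Int) - 86) := if_pos h
        rw [List.foldl_cons, List.filterMap_cons_some hc]
        show List.foldl _ (if 11 ≤ (c.toNat : Int) - 86 ∧ (c.toNat : Int) - 86 ≤ 36
          then acc ++ [(c.toNat : Int) - 86] else acc) cs = _
        rw [if_pos h, ih, List.append_assoc, List.singleton_append]
      · have hc : pvDigit? c = none := if_neg h
        rw [List.foldl_cons, List.filterMap_cons_none hc]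
        show List.foldl _ (if 11 ≤ (c.toNat : Int) - 86 ∧ (c.toNat : Int) - 86 ≤ 36
          then acc ++ [(c.toNat : Int) - 86] else acc) cs = _
        rw [if_neg h, ih]

theorem pvBase_eq (cs : List Char) :
    (PySem.List.pyRange 0 (cs.length : Int) 1).foldl (fun output i =>
      let n : Int := ((PySem.List.pyGetD cs i ' ').toNat : Int) - 86
      if 11 ≤ n ∧ n ≤ 36 then output ++ [n] else output) [] = cs.filterMap pvDigit? := by
  rw [PySem.List.foldl_pyRange_zero_pyGetD' cs ' '
      (fun output c => let n : Int := ((c.toNat : Int)) - 86;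
        if 11 ≤ n ∧ n ≤ 36 then output ++ [n] else output) []]
  simpa using pvBaseFold cs []

theorem pvIsalpha_iff (c : Char) :
    PySem.Chars.isalpha c = true ↔ ((97 ≤ c.toNat ∧ c.toNat ≤ 122) ∨ (65 ≤ c.toNat ∧ c.toNat ≤ 90)) := by
  simp [PySem.Chars.isalpha, PySem.Chars.isupper, PySem.Chars.islower, Char.le_def,
    UInt32.le_iff_toNat_le, Char.toNat_val]
  tauto

theorem pvLowerChar_toNat (c : Char) (h : c.toNat ≤ 126) :
    (PySem.Chars.lowerChar c).toNat = if 65 ≤ c.toNat ∧ c.toNat ≤ 90 then c.toNat + 32 else c.toNat := by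
  simp only [PySem.Chars.lowerChar, PySem.Chars.isupper, Char.le_def,
    UInt32.le_iff_toNat_le, Char.toNat_val, decide_eq_true_eq, Bool.and_eq_true]
  split_ifs with h1 h2 h2
  · rw [Char.toNat_ofNat, if_pos (by left; omega)]
  · simp at h1 h2; omega
  · simp at h1 h2; omega
  · rfl

-- on ASCII input, B's isalpha-after-lower filter picks exactly the same chars and values
theorem pvAlpha_digit (s : String) (h : pvDomStr s = true) :
    (PySem.Str.lower s).toList.filterMap (fun c =>
      if PySem.Chars.isalpha c then some ((c.toNat : Int) - 86) else none)
      = (PySem.Str.lower s).toList.filterMap pvDigit? := by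
  rw [show (PySem.Str.lower s).toList = s.toList.map PySem.Chars.lowerChar from by
        simp [PySem.Chars.lower]]
  rw [List.filterMap_map, List.filterMap_map]
  refine List.filterMap_congr (fun c hc => ?_)
  have hdom : pvDomChar c = true := by
    have hall : s.toList.all pvDomChar = true := by simpa [pvDomStr] using h
    exact List.all_eq_true.mp hall c hc
  have hcode : c.toNat ≤ 126 := by
    simp [pvDomChar] at hdom
    omega
  have hlc := pvLowerChar_toNat c hcode
  simp only [Function.comp_apply, pvDigit?]
  by_cases ha : PySem.Chars.isalpha (PySem.Chars.lowerChar c) = true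
  · have hd := (pvIsalpha_iff _).mp ha
    have hrange : 97 ≤ (PySem.Chars.lowerChar c).toNat ∧ (PySem.Chars.lowerChar c).toNat ≤ 122 := by
      by_cases hu : 65 ≤ c.toNat ∧ c.toNat ≤ 90
      · rw [if_pos hu] at hlc; omega
      · rw [if_neg hu] at hlc; omega
    rw [if_pos ha, if_pos (by omega)]
  · have hnr : ¬(97 ≤ (PySem.Chars.lowerChar c).toNat ∧ (PySem.Chars.lowerChar c).toNat ≤ 122) :=
      fun hr => ha ((pvIsalpha_iff _).mpr (Or.inl hr))
    rw [if_neg ha, if_neg (by omega)]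

-- the while loop folds over the i-th chunk
theorem pvWhileA_eq (a : List Int) (b : Int) (hb : 0 < b) (i : Int) (hi : 0 ≤ i) :
    ∀ (k : Nat) (j block : Int), 0 ≤ j → (b - j).toNat ≤ k →
      pvWhileA a b i j block =
        ((a.drop (i * b + j).toNat).take (b - j).toNat).foldl (fun blk d => 100 * blk + d) block := by
  intro k
  induction k with
  | zero =>
      intro j block hj hk
      rw [pvWhileA, if_neg (by omega)]
      have : (b - j).toNat = 0 := by omega
      simp [this]
  | succ k ih =>
      intro j block hj hk
      by_cases hc : j < b ∧ i * b + j < (a.length : Int)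
      · rw [pvWhileA, if_pos hc]
        rw [ih (j + 1) _ (by omega) (by omega)]
        have hib : 0 ≤ i * b := mul_nonneg hi hb.le
        have hp : (i * b + j).toNat < a.length := by omega
        have hdrop := List.drop_eq_getElem_cons hp
        have h1 : (i * b + (j + 1)).toNat = (i * b + j).toNat + 1 := by omega
        have h2 : (b - j).toNat = (b - (j + 1)).toNat + 1 := by omega
        have hget : PySem.List.pyGetD a (i * b + j) 0 = a[(i * b + j).toNat] :=
          PySem.List.pyGetD_eq_getElem a 0 (by omega) hc.2
        rw [h1, h2, hget, hdrop, List.take_succ_cons, List.foldl_cons]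
      · rw [pvWhileA, if_neg hc]
        rcases not_and_or.mp hc with h | h
        · have : (b - j).toNat = 0 := by omega
          simp [this]
        · have : a.length ≤ (i * b + j).toNat := by omega
          simp [List.drop_eq_nil_of_le this]

-- ceil(n/b) for b > 0
theorem pvCeil_eq (n b : Int) (hb : 0 < b) : -(Int.fdiv (-n) b) = (n + b - 1) / b := by
  have h1 := Int.mul_ediv_add_emod (n + b - 1) b
  have h2 := Int.emod_nonneg (n + b - 1) hb.ne'
  have h3 := Int.emod_lt_of_pos (n + b - 1) hb
  have h4 := Int.mul_fdiv_add_fmod (-n) b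
  have h5 := Int.fmod_nonneg_of_pos (-n) hb
  have h6 := Int.fmod_lt_of_pos (-n) hb
  nlinarith [sq_nonneg ((n + b - 1) / b + Int.fdiv (-n) b)]

-- A's block phase equals the canonical chunk list
theorem pvA_gold (a : List Int) (b : Int) (hb0 : b ≠ 0) :
    (PySem.List.pyRange 0 (-(PySem.Int.floordiv (-(a.length : Int)) b)) 1).foldl
      (fun output i => output ++ [pvWhileA a b i 0 0]) [] = pvGold a b := by
  rcases lt_or_gt_of_ne hb0 with hneg | hpos
  · have h1 : 0 ≤ PySem.Int.floordiv (-(a.length : Int)) b := by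
      have := PySem.Int.floordiv_neg_neg (a.length : Int) (-b)
      rw [neg_neg] at this
      rw [this]
      exact Int.fdiv_nonneg (by positivity) (by omega)
    rw [PySem.List.pyRange_one_eq_nil (by omega), pvGold, if_neg (by omega)]
    rfl
  · rw [PySem.List.foldl_append_singleton_eq_map, List.nil_append]
    rw [show PySem.Int.floordiv (-(a.length : Int)) b = Int.fdiv (-(a.length : Int)) b from rfl]
    rw [pvCeil_eq (a.length : Int) b hpos]
    rw [PySem.List.pyRange_one, pvGold, if_pos hpos, List.map_map]
    rw [show (((a.length : Int) + b - 1) / b - 0).toNat = (((a.length : Int) + b - 1) / b).toNat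
        from by norm_num]
    refine List.map_congr_left (fun k _ => ?_)
    simp only [Function.comp_apply, zero_add]
    rw [pvWhileA_eq a b hpos (k : Int) (by positivity) (b - 0).toNat (0 : Int) 0 le_rfl (by omega)]
    have e3 : ((k : Int) * b + 0).toNat = b.toNat * k := by
      have hkb : (k : Int) * b = ((k * b.toNat : Nat) : Int) := by
        push_cast
        rw [Int.toNat_of_nonneg hpos.le]
      rw [add_zero, hkb, Int.toNat_natCast, Nat.mul_comm]
    have e4 : (b - 0).toNat = b.toNat := by omega
    rw [e3, e4]
    rfl

-- ===== B-side lemmas =====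

theorem pvWsum_smul (l : List Int) : ∀ p, pvWsum l p = p * pvWsum l 1 := by
  induction l with
  | nil => intro p; simp [pvWsum]
  | cons n t ih =>
      intro p
      rw [pvWsum, pvWsum, ih (100 * p), ih (100 * 1)]
      ring

theorem pvHorner_wsum (l : List Int) : pvHorner l = pvWsum l.reverse 1 := by
  induction l using List.reverseRecOn with
  | nil => simp [pvHorner, pvWsum]
  | append_singleton l d ih =>
      have h1 : pvHorner (l ++ [d]) = 100 * pvHorner l + d := by
        simp [pvHorner, List.foldl_append]
      rw [h1, List.reverse_append, List.reverse_singleton, List.singleton_append,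
          pvWsum, pvWsum_smul l.reverse (100 * 1), ih]
      ring

-- running B's step over one whole chunk (need = its length) emits its weighted sum and resets
theorem pvChunkFold (b : Int) : ∀ (r out : List Int) (block p : Int), r ≠ [] →
    r.foldl (pvStepB b) (out, block, p, (r.length : Int)) = (out ++ [block + pvWsum r p], 0, 1, b) := by
  intro r
  induction r with
  | nil => intro _ _ _ h; exact absurd rfl h
  | cons n t ih =>
      intro out block p _
      rw [List.foldl_cons]
      cases t with
      | nil =>
          show List.foldl _ (pvStepB b (out, block, p, ((1 : Nat) : Int)) n) [] = _
          simp [pvStepB, pvWsum]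
      | cons m t' =>
          have hstep : pvStepB b (out, block, p, ((n :: m :: t').length : Int)) n
              = (out, block + n * p, 100 * p, (((m :: t').length : Nat) : Int)) := by
            simp only [pvStepB, List.length_cons]
            rw [if_neg (by simp; omega)]
            refine congrArg (fun x => (out, block + n * p, 100 * p, x)) ?_
            push_cast
            ring
          rw [hstep, ih out (block + n * p) (100 * p) (by simp),
            show pvWsum (n :: m :: t') p = n * p + pvWsum (m :: t') (100 * p) from rfl,
            add_assoc]

-- with a negative countdown the loop never emits
theorem pvNegFold (b : Int) : ∀ (r out : List Int) (block p need : Int), need < 0 →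
    (r.foldl (pvStepB b) (out, block, p, need)).1 = out := by
  intro r
  induction r with
  | nil => intro out block p need _; rfl
  | cons n t ih =>
      intro out block p need h
      rw [List.foldl_cons]
      show (List.foldl _ (pvStepB b (out, block, p, need) n) t).1 = out
      rw [pvStepB]
      simp only
      rw [if_neg (by simp; omega)]
      exact ih out _ _ _ (by omega)

-- splitting the canonical chunk list at its last (short) chunk
theorem pvGold_decomp (ds : List Int) (b : Int) (hb : 0 < b) (q tN : Nat)
    (hlen : ds.length = q * b.toNat + tN) (ht1 : 1 ≤ tN) (ht2 : tN ≤ b.toNat) :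
    pvGold ds b = pvGold (ds.take (q * b.toNat)) b ++ [pvHorner (ds.drop (q * b.toNat))] := by
  have hbN : (b.toNat : Int) = b := Int.toNat_of_nonneg hb.le
  have hlenI : (ds.length : Int) = (q : Int) * b + (tN : Int) := by
    rw [hlen]
    push_cast
    rw [hbN]
  have htI : (1 : Int) ≤ (tN : Int) ∧ (tN : Int) ≤ b := by
    constructor
    · exact_mod_cast ht1
    · calc (tN : Int) ≤ (b.toNat : Int) := by exact_mod_cast ht2
        _ = b := hbN
  have hcnt1 : ((ds.length : Int) + b - 1) / b = (q : Int) + 1 := by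
    rw [show (ds.length : Int) + b - 1 = ((tN : Int) - 1) + ((q : Int) + 1) * b from by
          rw [hlenI]; ring,
        Int.add_mul_ediv_right _ _ hb.ne',
        Int.ediv_eq_zero_of_lt (by omega) (by omega)]
    ring
  have hfrontlen : (ds.take (q * b.toNat)).length = q * b.toNat := by
    rw [List.length_take]
    omega
  have hcnt2 : (((ds.take (q * b.toNat)).length : Int) + b - 1) / b = (q : Int) := by
    rw [hfrontlen,
        show ((q * b.toNat : Nat) : Int) + b - 1 = (b - 1) + (q : Int) * b from by push_cast; rw [hbN]; ring,
        Int.add_mul_ediv_right _ _ hb.ne',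
        Int.ediv_eq_zero_of_lt (by omega) (by omega)]
    ring
  rw [pvGold, pvGold, if_pos hb, if_pos hb, hcnt1, hcnt2,
      show ((q : Int) + 1).toNat = q + 1 from by omega,
      show ((q : Int)).toNat = q from by omega,
      List.range_succ, List.map_append, List.map_singleton]
  congr 1
  · refine List.map_congr_left (fun k hk => ?_)
    have hkq : k < q := List.mem_range.mp hk
    congr 1
    rw [List.drop_take, List.take_take]
    have hmin : min b.toNat (q * b.toNat - b.toNat * k) = b.toNat := by
      have hmul : b.toNat * (k + 1) ≤ b.toNat * q := Nat.mul_le_mul_left _ (by omega)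
      have hms : b.toNat * (k + 1) = b.toNat * k + b.toNat := Nat.mul_succ _ _
      have hqb : q * b.toNat = b.toNat * q := Nat.mul_comm _ _
      omega
    rw [hmin]
  · congr 1
    rw [Nat.mul_comm q b.toNat, List.take_of_length_le (by rw [List.length_drop, Nat.mul_comm b.toNat q]; omega)]

-- B's reverse pass produces the canonical chunk list, reversed
theorem pvBfold_gold (b : Int) (hb : 0 < b) : ∀ (n : Nat) (ds out : List Int), ds.length ≤ n →
    (ds.reverse.foldl (pvStepB b)
       (out, 0, 1, if PySem.Int.mod (ds.length : Int) b == 0 then b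
                   else PySem.Int.mod (ds.length : Int) b)).1
      = out ++ (pvGold ds b).reverse := by
  have hgnil : pvGold [] b = [] := by
    rw [pvGold, if_pos hb]
    simp only [List.length_nil, Nat.cast_zero, zero_add]
    rw [Int.ediv_eq_zero_of_lt (by omega) (by omega)]
    simp
  intro n
  induction n with
  | zero =>
      intro ds out h
      have hds : ds = [] := List.eq_nil_of_length_eq_zero (by omega)
      subst hds
      simp [hgnil]
  | succ n ih =>
      intro ds out h
      by_cases hnil : ds = []
      · subst hnil
        simp [hgnil]
      · have hL : 0 < ds.length := List.length_pos_iff.mpr hnil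
        have hbN : (b.toNat : Int) = b := Int.toNat_of_nonneg hb.le
        have hmem : PySem.Int.mod ((ds.length : Int)) b = (ds.length : Int) % b :=
          PySem.Int.mod_eq_emod_of_pos hb
        set L : Int := (ds.length : Int) with hLdef
        set t : Int := if PySem.Int.mod L b == 0 then b else PySem.Int.mod L b with ht
        have hLpos : (0 : Int) < L := by rw [hLdef]; exact_mod_cast hL
        have hediv := Int.emod_add_ediv L b
        have hq0 : 0 ≤ L / b := Int.ediv_nonneg hLpos.le hb.le
        have hbq : 0 ≤ b * (L / b) := mul_nonneg hb.le hq0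
        have hm0 : 0 ≤ L % b := Int.emod_nonneg L hb.ne'
        have hmlt : L % b < b := Int.emod_lt_of_pos L hb
        have ht1 : 1 ≤ t ∧ t ≤ b := by
          by_cases h0 : L % b = 0
          · rw [ht, hmem, h0]
            simp
            omega
          · rw [ht, hmem, if_neg (by simpa using h0)]
            omega
        have htL : t ≤ L := by
          by_cases h0 : L % b = 0
          · rw [ht, hmem, h0]
            simp
            have h1 : 1 ≤ L / b := by
              by_contra hcon
              push_neg at hcon
              have : b * (L / b) ≤ 0 := mul_nonpos_of_nonneg_of_nonpos hb.le (by omega)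
              omega
            have h2 : b * 1 ≤ b * (L / b) := mul_le_mul_of_nonneg_left h1 hb.le
            omega
          · rw [ht, hmem, if_neg (by simpa using h0)]
            omega
        have hdvd : (b : Int) ∣ (L - t) := by
          by_cases h0 : L % b = 0
          · rw [ht, hmem, h0]
            simp
            have hLb : b * (L / b) = L := by omega
            exact ⟨L / b, hLb.symm⟩
          · rw [ht, hmem, if_neg (by simpa using h0)]
            exact ⟨L / b, by omega⟩
        set tN : Nat := t.toNat with htN
        have htcast : (tN : Int) = t := Int.toNat_of_nonneg (by omega)
        have htNle : tN ≤ ds.length := by omega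
        set FN : Nat := ds.length - tN with hFN
        have hFcast : (FN : Int) = L - t := by
          rw [hFN, Nat.cast_sub htNle, htcast]
        obtain ⟨qI, hqI⟩ := hdvd
        have hq_nonneg : 0 ≤ qI := by
          have hnn : 0 ≤ b * qI := by omega
          exact (mul_nonneg_iff_of_pos_left hb).mp hnn
        set qN : Nat := qI.toNat with hqN
        have hFq : FN = qN * b.toNat := by
          have hcast : (FN : Int) = ((qN * b.toNat : Nat) : Int) := by
            rw [hFcast, hqI]
            push_cast
            rw [hqN, Int.toNat_of_nonneg hq_nonneg, hbN]
            ring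
          exact_mod_cast hcast
        have hlastlen : (ds.drop FN).length = tN := by
          rw [List.length_drop]
          omega
        have hlastne : ds.drop FN ≠ [] := by
          apply List.ne_nil_of_length_pos
          rw [hlastlen]
          omega
        have hsplit : ds.reverse = (ds.drop FN).reverse ++ (ds.take FN).reverse := by
          conv_lhs => rw [← List.take_append_drop FN ds]
          rw [List.reverse_append]
        rw [hsplit, List.foldl_append]
        have hneed : t = (((ds.drop FN).reverse.length : Nat) : Int) := by
          rw [List.length_reverse, hlastlen, htcast]
        rw [hneed, pvChunkFold b _ out 0 1 (by simpa using hlastne)]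
        have hfrontlen : (ds.take FN).length = FN := by
          rw [List.length_take]
          omega
        have hmodF : PySem.Int.mod (((ds.take FN).length : Int)) b = 0 := by
          rw [PySem.Int.mod_eq_emod_of_pos hb, hfrontlen, hFcast, hqI]
          exact Int.mul_emod_right b qI
        have hih := ih (ds.take FN) (out ++ [0 + pvWsum (ds.drop FN).reverse 1])
          (by rw [hfrontlen]; omega)
        rw [show (if PySem.Int.mod (((ds.take FN).length : Int)) b == 0 then b
                  else PySem.Int.mod (((ds.take FN).length : Int)) b) = b from by
              rw [hmodF]; simp] at hih
        rw [hih]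
        rw [pvGold_decomp ds b hb qN tN (by omega) (by omega) (by omega), ← hFq,
           List.reverse_append, pvHorner_wsum]
        simp [List.append_assoc]

-- ===== VERDICT (by name: the statement is the Claim_ definition above) =====
theorem text2ints_spec : Claim_equal_text2ints := by
  intro s b hdom hpre
  have hs : pvDomStr s = true := by
    have := hdom
    unfold Dom_text2ints at this
    exact (Bool.and_eq_true _ _ |>.mp this).1
  unfold Spec_text2ints text2ints_alt
  simp only
  rw [pvAlpha_digit s hs]
  by_cases hb : b = 1
  · subst hb
    rw [text2ints]
    simp only [BEq.rfl, if_true]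
    exact pvBase_eq _
  · rw [text2ints]
    rw [if_neg (by simp [hb]), if_neg (by simp [hb])]
    have hA1 : text2ints s 1 = ((PySem.Str.lower s).toList.filterMap pvDigit?) := by
      rw [text2ints]; simp only [BEq.rfl, if_true]; exact pvBase_eq _
    rw [hA1, pvA_gold _ b hpre]
    set ds := (PySem.Str.lower s).toList.filterMap pvDigit? with hds
    rcases lt_or_gt_of_ne hpre with hneg | hpos
    · -- b < 0: both sides are []
      have hgold : pvGold ds b = [] := by rw [pvGold, if_neg (by omega)]
      rw [hgold]
      have hm := PySem.Int.mod_neg_bounds (ds.length : Int) hneg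
      have : (if PySem.Int.mod (ds.length : Int) b == 0 then b
              else PySem.Int.mod (ds.length : Int) b) < 0 := by
        by_cases h0 : PySem.Int.mod (ds.length : Int) b = 0
        · simp [h0]; omega
        · rw [if_neg (by simpa using h0)]; omega
      rw [pvNegFold b ds.reverse [] 0 1 _ this]
      rfl
    · rw [pvBfold_gold b hpos ds.length ds [] le_rfl]
      simp
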